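-- pv_equiv track=rewrite | github.com/reymonzakhary/print | microservices/search/search/services/redisearch_service.py | _filter_and_sort_single_char
-- ===== SOURCE A (Python) =====
-- def _filter_and_sort_single_char(results, query):
--     """Filter and sort single character search results."""
--     starts_with_char = []
--     contains_char = []
--     query_lower = query.lower()
--
--     for item in results:
--         if 'name' in item:
--             name_lower = item['name'].lower()
--             if name_lower.startswith(query_lower):
--                 starts_with_char.append(item)
--             elif query_lower in name_lower:
--                 contains_char.append(item)
--
--     return starts_with_char + contains_char
-- ===== SOURCE B (Python) =====
-- def _filter_and_sort_single_char(results, query):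
--     """Filter and sort single character search results."""
--     q = query.lower()
--     filtered = [item for item in results if 'name' in item and q in item['name'].lower()]
--     return sorted(filtered, key=lambda item: 0 if item['name'].lower().startswith(q) else 1)
-- ===== Notes on version B (the rewrite author's own statement) =====
-- stated objective: idiomatic
-- what changed: Replaces A's explicit two-bucket partition loop with a single filter comprehension followed by a stable sort on a two-valued key (0 for prefix matches, 1 for substring-only), relying on sort stability to reproduce A's concatenation order.
import Mathlib
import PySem

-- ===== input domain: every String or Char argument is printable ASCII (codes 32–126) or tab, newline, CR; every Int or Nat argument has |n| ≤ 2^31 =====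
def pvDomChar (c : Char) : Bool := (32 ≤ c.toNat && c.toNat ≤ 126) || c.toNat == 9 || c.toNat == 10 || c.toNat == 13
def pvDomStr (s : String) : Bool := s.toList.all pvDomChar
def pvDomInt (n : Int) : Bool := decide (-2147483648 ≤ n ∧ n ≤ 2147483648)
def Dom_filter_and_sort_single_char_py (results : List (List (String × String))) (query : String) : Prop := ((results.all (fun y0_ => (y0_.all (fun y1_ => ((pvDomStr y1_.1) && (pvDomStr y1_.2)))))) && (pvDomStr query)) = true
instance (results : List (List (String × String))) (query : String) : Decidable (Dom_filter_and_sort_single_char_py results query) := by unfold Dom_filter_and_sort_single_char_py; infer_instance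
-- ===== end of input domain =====

-- B replaces A's explicit two-bucket partition loop with filter + a stable sort on a 0/1 key (idiomatic; same return value).

-- ===== PORT A =====
-- literal transliteration of A: two accumulator lists, one pass, concatenated at the end
def filter_and_sort_single_char_py (results : List (List (String × String))) (query : String) : List (List (String × String)) :=
  let queryLower := PySem.Str.lower query
  let acc := results.foldl
    (fun (acc : List (List (String × String)) × List (List (String × String))) item =>
      match (PySem.Dict.mk item).get? "name" with        -- 'name' in item / item['name']
      | none => acc
      | some name =>
        let nameLower := PySem.Str.lower name
        if PySem.Str.startswith nameLower queryLower then (acc.1 ++ [item], acc.2)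
        else if PySem.Str.isIn queryLower nameLower then (acc.1, acc.2 ++ [item])
        else acc)
    ([], [])
  acc.1 ++ acc.2

-- ===== PORT B =====
-- 'name' in item and q in item['name'].lower()
def pvHasSub (ql : String) (item : List (String × String)) : Bool :=
  match (PySem.Dict.mk item).get? "name" with
  | some name => PySem.Str.isIn ql (PySem.Str.lower name)
  | none => false

-- sort key: 0 if item['name'].lower().startswith(q) else 1 (items in the sorted list all carry 'name'; getD "" totalizes the lookup)
def pvKey (ql : String) (item : List (String × String)) : Int :=
  if PySem.Str.startswith (PySem.Str.lower (((PySem.Dict.mk item).get? "name").getD "")) ql then 0 else 1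

def filter_and_sort_single_char_py_alt (results : List (List (String × String))) (query : String) : List (List (String × String)) :=
  let q := PySem.Str.lower query
  PySem.List.sorted (results.filter (pvHasSub q)) (pvKey q) false

-- ===== PRECONDITION & SPEC =====
def Spec_filter_and_sort_single_char_py (results : List (List (String × String))) (query : String) (out : List (List (String × String))) : Prop := out = filter_and_sort_single_char_py_alt results query
instance (results : List (List (String × String))) (query : String) (out : List (List (String × String))) : Decidable (Spec_filter_and_sort_single_char_py results query out) := by unfold Spec_filter_and_sort_single_char_py; infer_instance

-- ===== CLAIM (what is proved, stated in full; the proofs are below) =====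
def Claim_equal_filter_and_sort_single_char_py : Prop := ∀ (results : List (List (String × String))) (query : String), Dom_filter_and_sort_single_char_py results query → Spec_filter_and_sort_single_char_py results query (filter_and_sort_single_char_py results query)

-- ===== LEMMAS AND PROOFS =====

-- A's "starts with" test as a predicate on items
def pvSW (ql : String) (item : List (String × String)) : Bool :=
  match (PySem.Dict.mk item).get? "name" with
  | some name => PySem.Str.startswith (PySem.Str.lower name) ql
  | none => false

-- insert into zs ++ o :: os when x goes exactly between
theorem pv_insert_mid {α : Type} (before : α → α → Bool) (x : α) (zs : List α) (o : α) (os : List α)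
    (hz : ∀ z ∈ zs, before x z = false) (ho : before x o = true) :
    PySem.List.insertBy before x (zs ++ o :: os) = zs ++ x :: o :: os := by
  induction zs with
  | nil => simp [PySem.List.insertBy, ho]
  | cons z zs ih =>
    have hzf : before x z = false := hz z (by simp)
    simp only [List.cons_append, PySem.List.insertBy, hzf]
    simp [ih (fun z hzm => hz z (by simp [hzm]))]

-- stable insertion sort with a {0,1}-valued key is filter-true ++ filter-false
theorem pv_binary_sort {α : Type} (p : α → Bool) (xs : List α) :
    ∀ (zs os : List α), (∀ z ∈ zs, p z = true) → (∀ o ∈ os, p o = false) →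
    xs.foldl (fun acc x =>
        PySem.List.insertBy (fun a b =>
          decide ((if p a then (0 : Int) else 1) < (if p b then (0 : Int) else 1))) x acc)
      (zs ++ os)
    = (zs ++ xs.filter p) ++ (os ++ xs.filter (fun x => !p x)) := by
  induction xs with
  | nil => intro zs os _ _; simp
  | cons x xs ih =>
    intro zs os hz ho
    by_cases hp : p x = true
    · have hstep : PySem.List.insertBy (fun a b =>
          decide ((if p a then (0 : Int) else 1) < (if p b then (0 : Int) else 1))) x (zs ++ os)
          = (zs ++ [x]) ++ os := by
        cases os with
        | nil =>
          rw [PySem.List.insertBy_of_forall_not_before]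
          · simp
          · intro y hy
            simp only [List.append_nil] at hy
            simp [hp, hz y hy]
        | cons o os' =>
          rw [pv_insert_mid]
          · simp
          · intro z hzm; simp [hp, hz z hzm]
          · simp [hp, ho o (by simp)]
      simp only [List.foldl_cons, hstep]
      rw [ih (zs ++ [x]) os
        (by intro z hzm; rcases List.mem_append.1 hzm with h | h
            · exact hz z h
            · simp at h; subst h; exact hp) ho]
      simp [hp]
    · have hp' : p x = false := by simpa using hp
      have hstep : PySem.List.insertBy (fun a b =>
          decide ((if p a then (0 : Int) else 1) < (if p b then (0 : Int) else 1))) x (zs ++ os)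
          = zs ++ (os ++ [x]) := by
        rw [PySem.List.insertBy_of_forall_not_before]
        · simp
        · intro y _; by_cases h : p y = true <;> simp [hp', h]
      simp only [List.foldl_cons, hstep]
      rw [ih zs (os ++ [x]) hz
        (by intro o hom; rcases List.mem_append.1 hom with h | h
            · exact ho o h
            · simp at h; subst h; exact hp')]
      simp [hp']

-- A's loop, characterised by two filters
theorem pv_A_loop (ql : String) (results : List (List (String × String))) :
    ∀ (sw cc : List (List (String × String))),
    results.foldl
      (fun (acc : List (List (String × String)) × List (List (String × String))) item =>
        match (PySem.Dict.mk item).get? "name" with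
        | none => acc
        | some name =>
          let nameLower := PySem.Str.lower name
          if PySem.Str.startswith nameLower ql then (acc.1 ++ [item], acc.2)
          else if PySem.Str.isIn ql nameLower then (acc.1, acc.2 ++ [item])
          else acc)
      (sw, cc)
    = (sw ++ results.filter (pvSW ql),
       cc ++ results.filter (fun i => pvHasSub ql i && !pvSW ql i)) := by
  induction results with
  | nil => intro sw cc; simp
  | cons item rest ih =>
    intro sw cc
    simp only [List.foldl_cons]
    cases hn : (PySem.Dict.mk item).get? "name" with
    | none =>
      simp only [ih]
      simp [pvSW, pvHasSub, hn]
    | some name =>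
      by_cases hs : PySem.Str.startswith (PySem.Str.lower name) ql = true
      · have hsC : PySem.Chars.startswith (PySem.Chars.lower name.toList) ql.toList = true := by
          simpa using hs
        simp only [hs, if_pos]
        rw [ih]
        simp [pvSW, pvHasSub, hn, hsC]
      · have hs' : PySem.Str.startswith (PySem.Str.lower name) ql = false := by simpa using hs
        by_cases hc : PySem.Str.isIn ql (PySem.Str.lower name) = true
        · have hsC : PySem.Chars.startswith (PySem.Chars.lower name.toList) ql.toList = false := by
            simpa using hs'
          have hcC : PySem.Chars.isIn ql.toList (PySem.Chars.lower name.toList) = true := by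
            simpa using hc
          simp only [hs', hc]
          simp only [Bool.false_eq_true, if_false, if_true]
          rw [ih]
          simp [pvSW, pvHasSub, hn, hsC, hcC]
        · have hc' : PySem.Str.isIn ql (PySem.Str.lower name) = false := by simpa using hc
          have hsC : PySem.Chars.startswith (PySem.Chars.lower name.toList) ql.toList = false := by
            simpa using hs'
          have hcC : PySem.Chars.isIn ql.toList (PySem.Chars.lower name.toList) = false := by
            simpa using hc'
          simp only [hs', hc']
          simp only [Bool.false_eq_true, if_false]
          rw [ih]
          simp [pvSW, pvHasSub, hn, hsC, hcC]

-- a prefix match is a substring match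
theorem pv_sw_imp_hasSub (ql s : List Char)
    (h : PySem.Chars.startswith s ql = true) : PySem.Chars.isIn ql s = true := by
  have hpre : ql <+: s := by simpa [PySem.Chars.startswith_iff] using h
  have hinf : ql <:+: s := hpre.isInfix
  simpa [PySem.Chars.isIn_iff_infix] using hinf

-- the key-0 items of B's filtered list are exactly A's starts-with bucket
theorem pv_filter_true (ql : String) (results : List (List (String × String))) :
    (results.filter (pvHasSub ql)).filter (fun i => pvKey ql i == 0)
    = results.filter (pvSW ql) := by
  rw [List.filter_filter]
  apply List.filter_congr
  intro item _
  cases hn : (PySem.Dict.mk item).get? "name" with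
  | none => simp [pvHasSub, pvSW, hn]
  | some name =>
    simp only [pvHasSub, pvSW, pvKey, hn, Option.getD_some]
    by_cases hs : PySem.Chars.startswith (PySem.Chars.lower name.toList) ql.toList = true
    · simp [hs, pv_sw_imp_hasSub ql.toList (PySem.Chars.lower name.toList) hs]
    · have hs' : PySem.Chars.startswith (PySem.Chars.lower name.toList) ql.toList = false := by
        simpa using hs
      simp [hs']

-- the key-1 items are exactly A's contains bucket
theorem pv_filter_false (ql : String) (results : List (List (String × String))) :
    (results.filter (pvHasSub ql)).filter (fun i => !(pvKey ql i == 0))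
    = results.filter (fun i => pvHasSub ql i && !pvSW ql i) := by
  rw [List.filter_filter]
  apply List.filter_congr
  intro item _
  cases hn : (PySem.Dict.mk item).get? "name" with
  | none => simp [pvHasSub, pvSW, hn]
  | some name =>
    simp only [pvHasSub, pvSW, pvKey, hn, Option.getD_some]
    by_cases hs : PySem.Chars.startswith (PySem.Chars.lower name.toList) ql.toList = true
    · simp [hs]
    · have hs' : PySem.Chars.startswith (PySem.Chars.lower name.toList) ql.toList = false := by
        simpa using hs
      simp [hs']

theorem pv_main (results : List (List (String × String))) (query : String) :
    filter_and_sort_single_char_py results query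
    = filter_and_sort_single_char_py_alt results query := by
  simp only [filter_and_sort_single_char_py, filter_and_sort_single_char_py_alt]
  rw [pv_A_loop]
  rw [PySem.List.sorted_eq_foldl_insertBy]
  calc
    (results.filter (pvSW (PySem.Str.lower query)))
        ++ results.filter (fun i => pvHasSub (PySem.Str.lower query) i && !pvSW (PySem.Str.lower query) i)
      = ([] ++ (results.filter (pvHasSub (PySem.Str.lower query))).filter
            (fun i => pvKey (PySem.Str.lower query) i == 0))
        ++ ([] ++ (results.filter (pvHasSub (PySem.Str.lower query))).filter
            (fun i => !(pvKey (PySem.Str.lower query) i == 0))) := by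
        rw [pv_filter_true, pv_filter_false]; simp
    _ = (results.filter (pvHasSub (PySem.Str.lower query))).foldl
          (fun acc x => PySem.List.insertBy (fun a b =>
            decide ((if pvKey (PySem.Str.lower query) a == 0 then (0 : Int) else 1)
                  < (if pvKey (PySem.Str.lower query) b == 0 then (0 : Int) else 1))) x acc)
          ([] ++ []) := by
        rw [pv_binary_sort (fun i => pvKey (PySem.Str.lower query) i == 0)
          (results.filter (pvHasSub (PySem.Str.lower query))) [] [] (by simp) (by simp)]
    _ = (results.filter (pvHasSub (PySem.Str.lower query))).foldl
          (fun acc x => PySem.List.insertBy (fun a b =>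
            decide (pvKey (PySem.Str.lower query) a < pvKey (PySem.Str.lower query) b)) x acc)
          [] := by
        have h1 : ∀ i, (if (pvKey (PySem.Str.lower query) i == 0) = true then (0 : Int) else 1)
            = pvKey (PySem.Str.lower query) i := by
          intro i
          simp only [pvKey]
          split_ifs <;> simp_all
        simp only [h1, List.nil_append]

-- ===== VERDICT (by name: the statement is the Claim_ definition above) =====
theorem filter_and_sort_single_char_py_spec : Claim_equal_filter_and_sort_single_char_py := by
  intro results query _
  unfold Spec_filter_and_sort_single_char_py
  exact pv_main results query
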